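-- pv_equiv track=rewrite | github.com/CarlosVillasenor/data-and-programming-foundations-for-ai-projects-2025 | 02 Python Fundamentals Part 2/02 Python Strings Part 2/coded-correspondence.py | vigenere_create_keyword_phrase
-- ===== SOURCE A (Python) =====
-- def vigenere_create_keyword_phrase(phrase, keyword):
--   keyword_phrase = ""
--   current_index = 0
--
--   for char in phrase:
--     if not char == " ":
--       keyword_phrase += keyword[current_index]
--       current_index += 1
--       if current_index == len(keyword): current_index = 0
--     else:
--       keyword_phrase += char
--   return keyword_phrase
-- ===== SOURCE B (Python) =====
-- def vigenere_create_keyword_phrase(phrase, keyword):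
--   words = phrase.split(' ')
--   idx = 0
--   pieces = []
--   for word in words:
--     buf = []
--     for _ch in word:
--       buf.append(keyword[idx])
--       idx += 1
--       if idx == len(keyword):
--         idx = 0
--     pieces.append(''.join(buf))
--   return ' '.join(pieces)
-- ===== Notes on version B (the rewrite author's own statement) =====
-- stated objective: alternative
-- what changed: B splits the phrase on ' ' into words and transforms word by word with a running keyword index carried across words, joining the pieces back with ' ', instead of A's single per-character loop with an inline space test.
-- outside the precondition, e.g. on vigenere_create_keyword_phrase('ab', ''): A raises IndexError, B raises IndexError
import Mathlib
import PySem

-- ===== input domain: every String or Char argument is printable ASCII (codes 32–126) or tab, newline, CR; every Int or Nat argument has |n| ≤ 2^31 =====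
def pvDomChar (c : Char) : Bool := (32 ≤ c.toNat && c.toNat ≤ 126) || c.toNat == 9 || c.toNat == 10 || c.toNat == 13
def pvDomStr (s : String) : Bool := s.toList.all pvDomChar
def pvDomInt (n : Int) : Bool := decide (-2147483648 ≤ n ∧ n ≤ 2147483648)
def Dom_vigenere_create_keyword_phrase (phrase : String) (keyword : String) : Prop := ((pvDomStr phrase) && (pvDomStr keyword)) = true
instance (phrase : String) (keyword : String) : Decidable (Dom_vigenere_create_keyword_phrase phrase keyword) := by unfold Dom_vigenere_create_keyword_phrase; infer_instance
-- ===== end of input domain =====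

-- B replaces A's per-character space test by splitting the phrase on ' ' and transforming
-- word by word with a running keyword index, joining with ' ' (objective: alternative decomposition).

-- ===== PORT A =====
-- A's loop body: for each char, if it is not ' ', append keyword[current_index] and advance
-- the wrapping index; else append the char.  keyword[current_index] is pyGet?; it is `none`
-- (Python IndexError) only for an empty keyword, which Pre_ excludes, so `.getD ' '` is never used
-- on admitted inputs.
def vigAstep (kw : List Char) (st : List Char × Int) (c : Char) : List Char × Int :=
  if !(c == ' ') then
    let acc := st.1 ++ [(PySem.List.pyGet? kw st.2).getD ' ']
    let i := st.2 + 1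
    if i = (kw.length : Int) then (acc, 0) else (acc, i)
  else (st.1 ++ [c], st.2)

def vigenere_create_keyword_phrase (phrase : String) (keyword : String) : String :=
  String.mk (phrase.toList.foldl (vigAstep keyword.toList) ([], 0)).1

-- ===== PORT B =====
-- inner loop of Source B: buf.append(keyword[idx]); idx wraps (same pyGet?/getD remark as above)
def vigBchar (kw : List Char) (st : List Char × Int) (_c : Char) : List Char × Int :=
  let b := st.1 ++ [(PySem.List.pyGet? kw st.2).getD ' ']
  let i := st.2 + 1
  if i = (kw.length : Int) then (b, 0) else (b, i)

-- outer loop of Source B: one word, carrying the running keyword index across words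
def vigBword (kw : List Char) (st : List (List Char) × Int) (w : List Char) : List (List Char) × Int :=
  let r := w.foldl (vigBchar kw) ([], st.2)
  (st.1 ++ [r.1], r.2)

def vigenere_create_keyword_phrase_alt (phrase : String) (keyword : String) : String :=
  let words := PySem.Chars.splitOn phrase.toList [' ']
  let r := words.foldl (vigBword keyword.toList) ([], 0)
  String.mk (PySem.Chars.join [' '] r.1)

-- ===== PRECONDITION & SPEC =====
-- Pre_ excludes exactly the inputs where Python raises: an empty keyword together with a
-- phrase containing a non-space character makes keyword[idx] an IndexError in A and in B alike.
def Pre_vigenere_create_keyword_phrase (phrase : String) (keyword : String) : Prop :=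
  keyword.toList ≠ [] ∨ phrase.toList.all (fun c => c == ' ') = true
instance (phrase : String) (keyword : String) : Decidable (Pre_vigenere_create_keyword_phrase phrase keyword) := by unfold Pre_vigenere_create_keyword_phrase; infer_instance

def pvWitness_vigenere_create_keyword_phrase : String × String := ("hello world", "abc")

def Spec_vigenere_create_keyword_phrase (phrase : String) (keyword : String) (out : String) : Prop := out = vigenere_create_keyword_phrase_alt phrase keyword
instance (phrase : String) (keyword : String) (out : String) : Decidable (Spec_vigenere_create_keyword_phrase phrase keyword out) := by unfold Spec_vigenere_create_keyword_phrase; infer_instance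

-- ===== CLAIM (what is proved, stated in full; the proofs are below) =====
def Claim_equal_vigenere_create_keyword_phrase : Prop := ∀ (phrase : String) (keyword : String), Dom_vigenere_create_keyword_phrase phrase keyword → Pre_vigenere_create_keyword_phrase phrase keyword → Spec_vigenere_create_keyword_phrase phrase keyword (vigenere_create_keyword_phrase phrase keyword)

-- ===== LEMMAS AND PROOFS =====

-- proof-only reference form of split-on-one-space
def splitSp : List Char → List (List Char)
  | [] => [[]]
  | c :: rest =>
    if c = ' ' then [] :: splitSp rest
    else
      match splitSp rest with
      | w :: ws => (c :: w) :: ws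
      | [] => [[c]]

theorem splitSp_ne_nil (l : List Char) : splitSp l ≠ [] := by
  cases l with
  | nil => simp [splitSp]
  | cons c rest =>
    simp only [splitSp]
    split_ifs
    · simp
    · cases h : splitSp rest <;> simp

theorem splitSp_no_space (l : List Char) : ∀ w ∈ splitSp l, ' ' ∉ w := by
  induction l with
  | nil => intro w hw; simp [splitSp] at hw; simp [hw]
  | cons c rest ih =>
    intro w hw
    simp only [splitSp] at hw
    split_ifs at hw with hc
    · rcases List.mem_cons.mp hw with h | h
      · simp [h]
      · exact ih w h
    · cases h : splitSp rest with
      | nil => exact absurd h (splitSp_ne_nil rest)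
      | cons w0 ws =>
        rw [h] at hw
        rcases List.mem_cons.mp hw with h2 | h2
        · subst h2
          intro hm
          rcases List.mem_cons.mp hm with h3 | h3
          · exact hc h3.symm
          · exact ih w0 (by simp [h]) h3
        · exact ih w (by simp [h, h2])

theorem join_splitSp (l : List Char) : PySem.Chars.join [' '] (splitSp l) = l := by
  induction l with
  | nil => simp [splitSp, PySem.Chars.join_singleton]
  | cons c rest ih =>
    simp only [splitSp]
    split_ifs with hc
    · cases h : splitSp rest with
      | nil => exact absurd h (splitSp_ne_nil rest)
      | cons w ws =>
        rw [PySem.Chars.join_cons_cons]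
        rw [h] at ih
        simp [ih, hc]
    · cases h : splitSp rest with
      | nil => exact absurd h (splitSp_ne_nil rest)
      | cons w ws =>
        rw [h] at ih
        cases ws with
        | nil =>
          simp [PySem.Chars.join_singleton] at ih ⊢
          simp [ih]
        | cons w2 ws2 =>
          rw [PySem.Chars.join_cons_cons] at ih ⊢
          simp [← ih]

-- splitOn.go with enough fuel computes splitSp
theorem splitOn_go_eq (fuel : Nat) (l cur : List Char) (acc : List (List Char))
    (hf : l.length < fuel) :
    PySem.Chars.splitOn.go [' '] fuel l cur acc =
      acc.reverse ++ (match splitSp l with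
        | w :: ws => (cur.reverse ++ w) :: ws
        | [] => []) := by
  induction fuel generalizing l cur acc with
  | zero => omega
  | succ n ih =>
    cases l with
    | nil =>
      simp [PySem.Chars.splitOn.go, splitSp]
    | cons c rest =>
      by_cases hc : c = ' '
      · have hpre : [' '].isPrefixOf (c :: rest) = true := by simp [hc, List.isPrefixOf]
        rw [show PySem.Chars.splitOn.go [' '] (n+1) (c :: rest) cur acc =
            PySem.Chars.splitOn.go [' '] n (List.drop 1 (c :: rest)) [] (cur.reverse :: acc) by
          simp [PySem.Chars.splitOn.go, hpre]]
        simp only [List.drop_succ_cons, List.drop_zero]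
        rw [ih rest [] (cur.reverse :: acc) (by simpa using Nat.lt_of_succ_lt_succ hf)]
        simp only [splitSp, if_pos hc]
        cases h : splitSp rest with
        | nil => exact absurd h (splitSp_ne_nil rest)
        | cons w ws => simp
      · have hpre : [' '].isPrefixOf (c :: rest) = false := by
          simp [List.isPrefixOf]; exact fun h => hc h.symm
        rw [show PySem.Chars.splitOn.go [' '] (n+1) (c :: rest) cur acc =
            PySem.Chars.splitOn.go [' '] n rest (c :: cur) acc by
          simp [PySem.Chars.splitOn.go, hpre]]
        rw [ih rest (c :: cur) acc (by simpa using Nat.lt_of_succ_lt_succ hf)]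
        simp only [splitSp, if_neg hc]
        cases h : splitSp rest with
        | nil => exact absurd h (splitSp_ne_nil rest)
        | cons w ws => simp

theorem splitOn_eq_splitSp (l : List Char) : PySem.Chars.splitOn l [' '] = splitSp l := by
  rw [PySem.Chars.splitOn, splitOn_go_eq (l.length + 1) l [] [] (by omega)]
  cases h : splitSp l with
  | nil => exact absurd h (splitSp_ne_nil l)
  | cons w ws => simp

-- vigBchar only ever appends to the buffer: the buffer argument factors out
theorem vigBchar_shift (kw : List Char) (w : List Char) : ∀ (buf : List Char) (i : Int),
    w.foldl (vigBchar kw) (buf, i) =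
      (buf ++ (w.foldl (vigBchar kw) ([], i)).1, (w.foldl (vigBchar kw) ([], i)).2) := by
  induction w with
  | nil => simp
  | cons c rest ih =>
    intro buf i
    simp only [List.foldl_cons]
    rw [show vigBchar kw (buf, i) c =
        (buf ++ (vigBchar kw ([], i) c).1, (vigBchar kw ([], i) c).2) by
      simp [vigBchar]; split_ifs <;> simp]
    rw [ih, ih ((vigBchar kw ([], i) c).1)]
    simp

-- on a space-free word A's char loop IS B's inner loop
theorem vigAstep_eq_on_word (kw : List Char) (w : List Char) (hw : ' ' ∉ w)
    (st : List Char × Int) :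
    w.foldl (vigAstep kw) st = w.foldl (vigBchar kw) st := by
  induction w generalizing st with
  | nil => rfl
  | cons c rest ih =>
    have hc : c ≠ ' ' := fun h => hw (by simp [h])
    simp only [List.foldl_cons]
    rw [show vigAstep kw st c = vigBchar kw st c by simp [vigAstep, vigBchar, hc]]
    exact ih (fun h => hw (List.mem_cons_of_mem _ h)) _

-- vigBword only ever appends to the output list
theorem vigBword_shift (kw : List Char) (ws : List (List Char)) :
    ∀ (out : List (List Char)) (i : Int),
    ws.foldl (vigBword kw) (out, i) =
      (out ++ (ws.foldl (vigBword kw) ([], i)).1, (ws.foldl (vigBword kw) ([], i)).2) := by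
  induction ws with
  | nil => simp
  | cons w rest ih =>
    intro out i
    simp only [List.foldl_cons, vigBword, List.nil_append]
    rw [ih (out ++ [(w.foldl (vigBchar kw) ([], i)).1]),
        ih [(w.foldl (vigBchar kw) ([], i)).1]]
    simp

theorem vigBword_fst_ne_nil (kw : List Char) (w : List Char) (ws : List (List Char)) (i : Int) :
    ((w :: ws).foldl (vigBword kw) ([], i)).1 ≠ [] := by
  simp only [List.foldl_cons, vigBword]
  rw [vigBword_shift]
  simp

-- abbreviation used to direct rewriting in main_corr
def foldlA (kw : List Char) (w : List Char) (acc : List Char) (i : Int) : List Char × Int :=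
  w.foldl (vigAstep kw) (acc, i)

-- the main correspondence: A's char loop over the joined words = B's word loop, joined
theorem main_corr (kw : List Char) (ws : List (List Char)) (hns : ∀ w ∈ ws, ' ' ∉ w)
    (hne : ws ≠ []) (acc : List Char) (i : Int) :
    (PySem.Chars.join [' '] ws).foldl (vigAstep kw) (acc, i) =
      (acc ++ PySem.Chars.join [' '] ((ws.foldl (vigBword kw) ([], i)).1),
       (ws.foldl (vigBword kw) ([], i)).2) := by
  induction ws generalizing acc i with
  | nil => exact absurd rfl hne
  | cons w rest ih =>
    cases rest with
    | nil =>
      simp only [PySem.Chars.join_singleton, List.foldl_cons, List.foldl_nil, vigBword]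
      rw [vigAstep_eq_on_word kw w (hns w (by simp)), vigBchar_shift]
      simp [PySem.Chars.join_singleton]
    | cons w2 rest2 =>
      have hw : foldlA kw w acc i = (acc ++ (w.foldl (vigBchar kw) ([], i)).1,
          (w.foldl (vigBchar kw) ([], i)).2) := by
        unfold foldlA
        rw [vigAstep_eq_on_word kw w (hns w (by simp)), vigBchar_shift]
      have hsp : ∀ (a : List Char) (j : Int), vigAstep kw (a, j) ' ' = (a ++ [' '], j) := by
        intro a j; simp [vigAstep]
      obtain ⟨bufs, j, hr, hbne⟩ : ∃ bufs j,
          (w2 :: rest2).foldl (vigBword kw) ([], (w.foldl (vigBchar kw) ([], i)).2) = (bufs, j)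
          ∧ bufs ≠ [] := by
        refine ⟨_, _, rfl, vigBword_fst_ne_nil kw w2 rest2 _⟩
      cases bufs with
      | nil => exact absurd rfl hbne
      | cons b bs =>
        rw [PySem.Chars.join_cons_cons, List.append_assoc, List.foldl_append,
          show (w.foldl (vigAstep kw) (acc, i)) = foldlA kw w acc i from rfl, hw,
          List.singleton_append, List.foldl_cons, hsp,
          ih (fun v hv => hns v (by simp [hv])) (by simp), hr,
          show ((w :: w2 :: rest2).foldl (vigBword kw) ([], i)) =
            (w2 :: rest2).foldl (vigBword kw) (vigBword kw ([], i) w) from rfl,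
          show vigBword kw ([], i) w = ([(w.foldl (vigBchar kw) ([], i)).1],
            (w.foldl (vigBchar kw) ([], i)).2) by simp [vigBword],
          show ([(w.foldl (vigBchar kw) ([], i)).1] : List (List Char)) =
            [] ++ [(w.foldl (vigBchar kw) ([], i)).1] by simp]
        rw [vigBword_shift kw (w2 :: rest2) ([] ++ [(w.foldl (vigBchar kw) ([], i)).1]), hr]
        simp [PySem.Chars.join_cons_cons]

-- ===== VERDICT (by name: the statement is the Claim_ definition above) =====
theorem vigenere_create_keyword_phrase_spec : Claim_equal_vigenere_create_keyword_phrase := by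
  intro phrase keyword _ _
  unfold Spec_vigenere_create_keyword_phrase
  unfold vigenere_create_keyword_phrase vigenere_create_keyword_phrase_alt
  simp only [splitOn_eq_splitSp]
  rw [show phrase.toList.foldl (vigAstep keyword.toList) ([], 0) =
      (PySem.Chars.join [' '] (splitSp phrase.toList)).foldl (vigAstep keyword.toList) ([], 0) by
    rw [join_splitSp]]
  rw [main_corr keyword.toList (splitSp phrase.toList) (splitSp_no_space phrase.toList)
    (splitSp_ne_nil phrase.toList) [] 0]
  simp
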